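-- pv_equiv track=rewrite | github.com/yashbhalerao5015/python_assignments | Q92.py | isUndulating
-- ===== SOURCE A (Python) =====
-- def isUndulating(num):
--     n = str(num)
--     if len(n) < 3:
--         return False
--
--     x=n[0]
--     for i in range(0,len(n),2):
--         if x != n[i]:
--             return False
--
--     y=n[1]
--     for j in range(1,len(n),2):
--         if y != n[j]:
--             return False
--
--     return True
-- ===== SOURCE B (Python) =====
-- def isUndulating(num):
--     n = str(num)
--     if len(n) < 3:
--         return False
--     pat = (n[0] + n[1]) * ((len(n) + 1) // 2)
--     return n == pat[:len(n)]
-- ===== Notes on version B (the rewrite author's own statement) =====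
-- stated objective: simpler
-- what changed: Replaces the two parity-indexed scan loops with constructing the expected undulating pattern from the first two characters and a single string equality check.
import Mathlib
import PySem

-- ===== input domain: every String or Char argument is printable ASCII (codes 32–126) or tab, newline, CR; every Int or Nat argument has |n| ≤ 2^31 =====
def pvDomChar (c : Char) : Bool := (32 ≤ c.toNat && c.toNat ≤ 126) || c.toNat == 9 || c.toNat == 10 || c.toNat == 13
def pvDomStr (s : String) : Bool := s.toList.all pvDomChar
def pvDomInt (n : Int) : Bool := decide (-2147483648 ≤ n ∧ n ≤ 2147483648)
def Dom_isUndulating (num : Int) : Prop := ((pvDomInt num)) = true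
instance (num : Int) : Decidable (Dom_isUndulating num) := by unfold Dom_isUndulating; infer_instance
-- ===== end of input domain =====

-- B builds the expected undulating pattern from the first two digits and compares once,
-- instead of A's two parity-indexed scan loops; objective: simpler.

-- ===== PORT A =====
-- The two early-return `for` loops are ported as `List.all` over the same ranges
-- (pure predicate, so early return and `all` coincide). n[i] is always in range
-- here (0 ≤ i < len(n)), so `pyGetD` with an unused default is exact.
def isUndulating (num : Int) : Bool :=
  let n := (PySem.Int.toStr num).toList
  if n.length < 3 then false
  else
    let x := PySem.List.pyGetD n 0 'a'
    if (PySem.List.pyRange 0 (n.length : Int) 2).all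
        (fun i => PySem.List.pyGetD n i 'a' == x) then
      let y := PySem.List.pyGetD n 1 'a'
      (PySem.List.pyRange 1 (n.length : Int) 2).all
        (fun j => PySem.List.pyGetD n j 'a' == y)
    else false

-- ===== PORT B =====
-- `n[0] + n[1]` is `n.take 2` (exact: len(n) ≥ 3 past the guard); string
-- repetition `* k` is `List.replicate k … |>.flatten`; `pat[:len(n)]` is `take`.
def isUndulating_alt (num : Int) : Bool :=
  let n := (PySem.Int.toStr num).toList
  if n.length < 3 then false
  else
    let pat := (List.replicate ((n.length + 1) / 2) (n.take 2)).flatten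
    n == pat.take n.length

-- ===== PRECONDITION & SPEC =====
def Spec_isUndulating (num : Int) (out : Bool) : Prop := out = isUndulating_alt num
instance (num : Int) (out : Bool) : Decidable (Spec_isUndulating num out) := by unfold Spec_isUndulating; infer_instance

-- ===== CLAIM (what is proved, stated in full; the proofs are below) =====
def Claim_equal_isUndulating : Prop := ∀ (num : Int), Dom_isUndulating num → Spec_isUndulating num (isUndulating num)

-- ===== LEMMAS AND PROOFS =====

/-- The alternating list a b a b … of length m. -/
def altAB (a b : Char) : Nat → List Char
  | 0 => []
  | m + 1 => a :: altAB b a m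

theorem length_altAB (a b : Char) (m : Nat) : (altAB a b m).length = m := by
  induction m generalizing a b with
  | zero => rfl
  | succ m ih => simp [altAB, ih]

theorem getElem_altAB (a b : Char) (m i : Nat) (h : i < m)
    (h' : i < (altAB a b m).length) :
    (altAB a b m)[i] = if i % 2 = 0 then a else b := by
  induction m generalizing a b i with
  | zero => omega
  | succ m ih =>
    cases i with
    | zero => simp [altAB]
    | succ i =>
      have hi : i < m := by omega
      simp only [altAB, List.getElem_cons_succ]
      rw [ih b a i hi (by rw [length_altAB]; exact hi)]
      rcases Nat.even_or_odd i with he | ho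
      · have h2 : i % 2 = 0 := Nat.even_iff.mp he
        have h3 : (i + 1) % 2 = 1 := by omega
        simp [h2, h3]
      · have h2 : i % 2 = 1 := Nat.odd_iff.mp ho
        have h3 : (i + 1) % 2 = 0 := by omega
        simp [h2, h3]

theorem take_flatten_replicate (a b : Char) (k m : Nat) (h : m ≤ 2 * k) :
    (List.replicate k [a, b]).flatten.take m = altAB a b m := by
  induction k generalizing a b m with
  | zero =>
    have : m = 0 := by omega
    subst this; rfl
  | succ k ih =>
    rw [List.replicate_succ, List.flatten_cons]
    match m with
    | 0 => rfl
    | 1 => simp [altAB]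
    | m + 2 =>
      have hm : m ≤ 2 * k := by omega
      simp only [List.cons_append, List.nil_append, List.take_succ_cons]
      rw [ih a b m hm]
      rfl

/-- Core equivalence on the character list, independent of `Int.toStr`. -/
theorem core_eq (n : List Char) (h3 : ¬ n.length < 3) :
    ((if (PySem.List.pyRange 0 (n.length : Int) 2).all
        (fun i => PySem.List.pyGetD n i 'a' == PySem.List.pyGetD n 0 'a') then
      (PySem.List.pyRange 1 (n.length : Int) 2).all
        (fun j => PySem.List.pyGetD n j 'a' == PySem.List.pyGetD n 1 'a')
    else false))
    = (n == ((List.replicate ((n.length + 1) / 2) (n.take 2)).flatten.take n.length)) := by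
  rcases n with _ | ⟨a, n⟩; · simp at h3
  rcases n with _ | ⟨b, n⟩; · simp at h3
  rcases n with _ | ⟨c, rest⟩; · simp at h3
  set n : List Char := a :: b :: c :: rest with hn
  have hL : 3 ≤ n.length := by simp [hn]
  have htake : n.take 2 = [a, b] := rfl
  have hx : PySem.List.pyGetD n 0 'a' = a := by
    rw [PySem.List.pyGetD_ofNat']; rfl
  have hy : PySem.List.pyGetD n 1 'a' = b := by
    rw [PySem.List.pyGetD_ofNat']; rfl
  rw [htake, hx, hy,
    take_flatten_replicate a b ((n.length + 1) / 2) n.length (by omega)]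
  -- turn both sides into Props
  rw [show (if (PySem.List.pyRange 0 (n.length : Int) 2).all
      (fun i => PySem.List.pyGetD n i 'a' == a) then
    (PySem.List.pyRange 1 (n.length : Int) 2).all
      (fun j => PySem.List.pyGetD n j 'a' == b)
  else false) = ((PySem.List.pyRange 0 (n.length : Int) 2).all
      (fun i => PySem.List.pyGetD n i 'a' == a) &&
    (PySem.List.pyRange 1 (n.length : Int) 2).all
      (fun j => PySem.List.pyGetD n j 'a' == b)) from by
      cases (PySem.List.pyRange 0 (n.length : Int) 2).all
        (fun i => PySem.List.pyGetD n i 'a' == a) <;> simp]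
  apply Bool.eq_iff_iff.mpr
  simp only [Bool.and_eq_true, List.all_eq_true, beq_iff_eq]
  constructor
  · rintro ⟨heven, hodd⟩
    apply List.ext_getElem (by rw [length_altAB])
    intro i hi hi'
    rw [getElem_altAB a b n.length i hi hi']
    rcases Nat.even_or_odd i with he | ho
    · have h2 : i % 2 = 0 := Nat.even_iff.mp he
      have hmem : (i : Int) ∈ PySem.List.pyRange 0 (n.length : Int) 2 := by
        rw [PySem.List.mem_pyRange_iff_of_pos (by norm_num)]
        refine ⟨by positivity, by exact_mod_cast hi, ?_⟩
        omega
      have := heven (i : Int) hmem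
      rw [PySem.List.pyGetD_eq_getElem n 'a' (by positivity) (by exact_mod_cast hi)] at this
      simpa [h2] using this
    · have h2 : i % 2 = 1 := Nat.odd_iff.mp ho
      have hmem : (i : Int) ∈ PySem.List.pyRange 1 (n.length : Int) 2 := by
        rw [PySem.List.mem_pyRange_iff_of_pos (by norm_num)]
        refine ⟨by exact_mod_cast Nat.one_le_iff_ne_zero.mpr (by omega), by exact_mod_cast hi, ?_⟩
        omega
      have := hodd (i : Int) hmem
      rw [PySem.List.pyGetD_eq_getElem n 'a' (by positivity) (by exact_mod_cast hi)] at this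
      simpa [h2] using this
  · intro hEq
    constructor
    · intro i hmem
      rw [PySem.List.mem_pyRange_iff_of_pos (by norm_num)] at hmem
      obtain ⟨h0, h1, hdvd⟩ := hmem
      have hlt : i.toNat < n.length := by omega
      rw [PySem.List.pyGetD_eq_getElem n 'a' h0 h1,
        List.getElem_of_eq hEq hlt,
        getElem_altAB a b n.length i.toNat hlt (by rw [length_altAB]; exact hlt)]
      have : i.toNat % 2 = 0 := by omega
      simp [this]
    · intro j hmem
      rw [PySem.List.mem_pyRange_iff_of_pos (by norm_num)] at hmem
      obtain ⟨h0, h1, hdvd⟩ := hmem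
      have h0' : (0 : Int) ≤ j := by omega
      have hlt : j.toNat < n.length := by omega
      rw [PySem.List.pyGetD_eq_getElem n 'a' h0' h1,
        List.getElem_of_eq hEq hlt,
        getElem_altAB a b n.length j.toNat hlt (by rw [length_altAB]; exact hlt)]
      have : j.toNat % 2 = 1 := by omega
      simp [this]

-- ===== VERDICT (by name: the statement is the Claim_ definition above) =====
theorem isUndulating_spec : Claim_equal_isUndulating := by
  intro num _
  unfold Spec_isUndulating isUndulating isUndulating_alt
  set n := (PySem.Int.toStr num).toList with hn
  by_cases h3 : n.length < 3
  · simp [h3]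
  · simp only [h3, if_false]
    exact core_eq n h3
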